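-- pv_equiv track=rewrite | github.com/tqtran/pip-pi | modules/wifi_scan.py | _parse_security
-- ===== SOURCE A (Python) =====
-- def _parse_security(block_lines):
--     """Derive security string from a single BSS block."""
--     has_rsn = False
--     has_wpa = False
--     has_privacy = False
--     akm_text = ""
--     in_rsn = False
--
--     for ln in block_lines:
--         low = ln.lower().strip()
--
--         if low.startswith("capability:"):
--             has_privacy = "privacy" in low
--
--         elif low.startswith("rsn:"):
--             has_rsn = True
--             in_rsn = True
--
--         elif low.startswith("wpa:"):
--             has_wpa = True
--             in_rsn = False
--
--         elif low.endswith(":") and not low.startswith("*"):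
--             in_rsn = False
--
--         if in_rsn and ("authentication suites:" in low or "akm suites:" in low):
--             akm_text += " " + ln.split(":", 1)[-1].strip().upper()
--
--     if has_rsn:
--         has_sae = "SAE" in akm_text
--         has_psk = "PSK" in akm_text
--         has_8021x = "802.1X" in akm_text or "IEEE" in akm_text
--
--         if has_sae and has_psk:
--             return "WPA2/WPA3"
--         if has_sae:
--             return "WPA3"
--         if has_8021x:
--             return "WPA2-ENT"
--         return "WPA2"
--
--     if has_wpa:
--         return "WPA"
--     if has_privacy:
--         return "WEP"
--     return "Open"
-- ===== SOURCE B (Python) =====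
-- def _kind(ln):
--     low = ln.lower().strip()
--     if low.startswith("capability:"):
--         return "cap"
--     if low.startswith("rsn:"):
--         return "rsn"
--     if low.startswith("wpa:"):
--         return "wpa"
--     if low.endswith(":") and not low.startswith("*"):
--         return "hdr"
--     return "other"
--
--
-- def _suite_text(ln):
--     low = ln.lower().strip()
--     if "authentication suites:" in low or "akm suites:" in low:
--         return " " + ln.split(":", 1)[-1].strip().upper()
--     return ""
--
--
-- def _collect_akm(lines):
--     out = ""
--     i = 0
--     n = len(lines)
--     while i < n:
--         if _kind(lines[i]) != "rsn":
--             i += 1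
--             continue
--         while i < n and _kind(lines[i]) not in ("wpa", "hdr"):
--             out += _suite_text(lines[i])
--             i += 1
--     return out
--
--
-- def _parse_security(block_lines):
--     has_rsn = any(_kind(ln) == "rsn" for ln in block_lines)
--     has_wpa = any(_kind(ln) == "wpa" for ln in block_lines)
--     caps = [ln.lower().strip() for ln in block_lines if _kind(ln) == "cap"]
--     has_privacy = bool(caps) and "privacy" in caps[-1]
--     akm_text = _collect_akm(block_lines)
--
--     if has_rsn:
--         has_sae = "SAE" in akm_text
--         has_psk = "PSK" in akm_text
--         has_8021x = "802.1X" in akm_text or "IEEE" in akm_text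
--         if has_sae and has_psk:
--             return "WPA2/WPA3"
--         if has_sae:
--             return "WPA3"
--         if has_8021x:
--             return "WPA2-ENT"
--         return "WPA2"
--     if has_wpa:
--         return "WPA"
--     if has_privacy:
--         return "WEP"
--     return "Open"
-- ===== Notes on version B (the rewrite author's own statement) =====
-- stated objective: alternative
-- what changed: A's single pass threading five mutable accumulators is replaced by separate passes over the classified lines: two any() scans for RSN/WPA presence, a filtered list whose last element decides privacy, and a dedicated skip/gather scan collecting akm text only inside RSN sections; it trades one stateful loop for several stateless passes of the same total cost.
import Mathlib
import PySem

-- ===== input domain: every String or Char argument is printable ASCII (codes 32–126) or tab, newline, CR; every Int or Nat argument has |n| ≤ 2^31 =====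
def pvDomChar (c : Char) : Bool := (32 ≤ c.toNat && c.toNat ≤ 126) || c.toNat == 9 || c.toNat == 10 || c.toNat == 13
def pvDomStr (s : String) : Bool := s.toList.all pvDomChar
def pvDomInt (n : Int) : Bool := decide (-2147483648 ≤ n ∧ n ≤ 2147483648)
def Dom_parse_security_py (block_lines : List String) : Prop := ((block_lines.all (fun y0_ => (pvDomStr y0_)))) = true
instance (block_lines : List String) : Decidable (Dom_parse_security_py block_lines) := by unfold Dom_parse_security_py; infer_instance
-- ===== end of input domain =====

-- B replaces A's five-accumulator single pass by separate passes (any / last-capability / a skip-gather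
-- scan for the RSN akm text) over the classified lines; objective: alternative decomposition, same cost.

-- shared helper: Python's  ln.split(":", 1)[-1]  (both sources contain this exact expression)
def pySplitColonLast (ln : String) : String :=
  ((PySem.Str.splitMax? ln ":" 1).getD [ln]).getLastD ln

-- ===== PORT A =====
-- state: (has_rsn, has_wpa, has_privacy, akm_text, in_rsn)
def stepA (s : Bool × Bool × Bool × String × Bool) (ln : String) : Bool × Bool × Bool × String × Bool :=
  let low := PySem.Str.strip (PySem.Str.lower ln)
  let (has_rsn, has_wpa, has_privacy, akm_text, in_rsn) := s
  let (has_rsn, has_wpa, has_privacy, in_rsn) :=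
    if PySem.Str.startswith low "capability:" then
      (has_rsn, has_wpa, PySem.Str.isIn "privacy" low, in_rsn)
    else if PySem.Str.startswith low "rsn:" then
      (true, has_wpa, has_privacy, true)
    else if PySem.Str.startswith low "wpa:" then
      (has_rsn, true, has_privacy, false)
    else if PySem.Str.endswith low ":" && !PySem.Str.startswith low "*" then
      (has_rsn, has_wpa, has_privacy, false)
    else
      (has_rsn, has_wpa, has_privacy, in_rsn)
  let akm_text :=
    if in_rsn && (PySem.Str.isIn "authentication suites:" low || PySem.Str.isIn "akm suites:" low) then
      akm_text ++ (" " ++ PySem.Str.upper (PySem.Str.strip (pySplitColonLast ln)))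
    else akm_text
  (has_rsn, has_wpa, has_privacy, akm_text, in_rsn)

def parse_security_py (block_lines : List String) : String :=
  let r := block_lines.foldl stepA (false, false, false, "", false)
  let (has_rsn, has_wpa, has_privacy, akm_text, _) := r
  if has_rsn then
    let has_sae := PySem.Str.isIn "SAE" akm_text
    let has_psk := PySem.Str.isIn "PSK" akm_text
    let has_8021x := PySem.Str.isIn "802.1X" akm_text || PySem.Str.isIn "IEEE" akm_text
    if has_sae && has_psk then "WPA2/WPA3"
    else if has_sae then "WPA3"
    else if has_8021x then "WPA2-ENT"
    else "WPA2"
  else if has_wpa then "WPA"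
  else if has_privacy then "WEP"
  else "Open"

-- ===== PORT B =====
inductive LKind where
  | cap | rsn | wpa | hdr | other
deriving DecidableEq, Repr

def lowOf (ln : String) : String := PySem.Str.strip (PySem.Str.lower ln)

def kindOf (ln : String) : LKind :=
  let low := lowOf ln
  if PySem.Str.startswith low "capability:" then .cap
  else if PySem.Str.startswith low "rsn:" then .rsn
  else if PySem.Str.startswith low "wpa:" then .wpa
  else if PySem.Str.endswith low ":" && !PySem.Str.startswith low "*" then .hdr
  else .other

def suiteText (ln : String) : String :=
  let low := lowOf ln
  if PySem.Str.isIn "authentication suites:" low || PySem.Str.isIn "akm suites:" low then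
    " " ++ PySem.Str.upper (PySem.Str.strip (pySplitColonLast ln))
  else ""

-- the two modes of Source B's skip/gather scan (_collect_akm's outer and inner loops)
mutual
def collectAkm : List String → String
  | [] => ""
  | ln :: rest => if kindOf ln = .rsn then suiteText ln ++ gatherAkm rest else collectAkm rest
def gatherAkm : List String → String
  | [] => ""
  | ln :: rest =>
    if kindOf ln = .wpa ∨ kindOf ln = .hdr then collectAkm rest
    else suiteText ln ++ gatherAkm rest
end

def parse_security_py_alt (block_lines : List String) : String :=
  let has_rsn := block_lines.any (fun ln => kindOf ln == .rsn)
  let has_wpa := block_lines.any (fun ln => kindOf ln == .wpa)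
  let caps := (block_lines.filter (fun ln => kindOf ln == .cap)).map lowOf
  let has_privacy := match caps.getLast? with
    | some c => PySem.Str.isIn "privacy" c
    | none => false
  let akm_text := collectAkm block_lines
  if has_rsn then
    if PySem.Str.isIn "SAE" akm_text && PySem.Str.isIn "PSK" akm_text then "WPA2/WPA3"
    else if PySem.Str.isIn "SAE" akm_text then "WPA3"
    else if PySem.Str.isIn "802.1X" akm_text || PySem.Str.isIn "IEEE" akm_text then "WPA2-ENT"
    else "WPA2"
  else if has_wpa then "WPA"
  else if has_privacy then "WEP"
  else "Open"

-- ===== PRECONDITION & SPEC =====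
def Spec_parse_security_py (block_lines : List String) (out : String) : Prop := out = parse_security_py_alt block_lines
instance (block_lines : List String) (out : String) : Decidable (Spec_parse_security_py block_lines out) := by unfold Spec_parse_security_py; infer_instance

-- ===== CLAIM (what is proved, stated in full; the proofs are below) =====
def Claim_equal_parse_security_py : Prop := ∀ (block_lines : List String), Dom_parse_security_py block_lines → Spec_parse_security_py block_lines (parse_security_py block_lines)

-- ===== LEMMAS AND PROOFS =====

-- proof-side reference functions for the components of A's fold state
def ctxStep (r : Bool) (l : String) : Bool :=
  match kindOf l with
  | .rsn => true
  | .wpa => false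
  | .hdr => false
  | _ => r

def privAux : List String → Bool → Bool
  | [], c => c
  | l :: ls, c => privAux ls (if kindOf l = .cap then PySem.Str.isIn "privacy" (lowOf l) else c)

def collectCtx : List String → Bool → String
  | [], _ => ""
  | l :: ls, r =>
    let r' := ctxStep r l
    (if r' then suiteText l else "") ++ collectCtx ls r'

def inAux : List String → Bool → Bool
  | [], r => r
  | l :: ls, r => inAux ls (ctxStep r l)

theorem stepA_eq (a b c : Bool) (t : String) (r : Bool) (l : String) :
    stepA (a, b, c, t, r) l =
      (a || (kindOf l == .rsn), b || (kindOf l == .wpa),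
       if kindOf l = .cap then PySem.Str.isIn "privacy" (lowOf l) else c,
       t ++ (if ctxStep r l then suiteText l else ""),
       ctxStep r l) := by
  cases r <;> cases a <;> cases b <;>
    (simp only [stepA, kindOf, ctxStep, suiteText, lowOf]; split_ifs <;> simp_all [String.append_empty])

theorem foldA_char (ls : List String) (a b c : Bool) (t : String) (r : Bool) :
    ls.foldl stepA (a, b, c, t, r) =
      (a || ls.any (fun l => kindOf l == .rsn),
       b || ls.any (fun l => kindOf l == .wpa),
       privAux ls c,
       t ++ collectCtx ls r,
       inAux ls r) := by
  induction ls generalizing a b c t r with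
  | nil => simp [privAux, collectCtx, inAux, String.append_empty]
  | cons l ls ih =>
    rw [List.foldl_cons, stepA_eq, ih]
    simp only [List.any_cons, privAux, collectCtx, inAux, Bool.or_assoc, String.append_assoc]

theorem collect_eq (ls : List String) :
    collectCtx ls false = collectAkm ls ∧ collectCtx ls true = gatherAkm ls := by
  induction ls with
  | nil => simp [collectCtx, collectAkm, gatherAkm]
  | cons l ls ih =>
    obtain ⟨ih0, ih1⟩ := ih
    rw [collectCtx, collectCtx, collectAkm, gatherAkm]
    cases h : kindOf l <;>
      simp [ctxStep, h, ih0, ih1, String.empty_append]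

theorem privAux_eq (ls : List String) (c : Bool) :
    privAux ls c =
      match ((ls.filter (fun ln => kindOf ln == LKind.cap)).map lowOf).getLast? with
      | some x => PySem.Str.isIn "privacy" x
      | none => c := by
  induction ls generalizing c with
  | nil => simp [privAux]
  | cons l ls ih =>
    simp only [privAux, List.filter_cons]
    by_cases h : kindOf l = .cap
    · have hb : (kindOf l == LKind.cap) = true := by simp [h]
      rw [if_pos h, if_pos hb, List.map_cons, ih]
      cases hM : ((ls.filter (fun ln => kindOf ln == LKind.cap)).map lowOf) with
      | nil => rfl
      | cons m ms => rw [List.getLast?_cons_cons, List.getLast?_cons]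
    · have hb : ¬ ((kindOf l == LKind.cap) = true) := by simp [h]
      rw [if_neg h, if_neg hb]
      exact ih c

theorem parse_security_py_eq_alt (block_lines : List String) :
    parse_security_py block_lines = parse_security_py_alt block_lines := by
  simp only [parse_security_py, parse_security_py_alt, foldA_char, Bool.false_or,
    String.empty_append, (collect_eq block_lines).1, privAux_eq]

-- ===== VERDICT (by name: the statement is the Claim_ definition above) =====
theorem parse_security_py_spec : Claim_equal_parse_security_py := by
  intro block_lines _
  unfold Spec_parse_security_py
  exact parse_security_py_eq_alt block_lines
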